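-- pv_equiv track=rewrite | github.com/El9205/algorithm_lessons | Lesson_4/task4_2.py | version_1
-- ===== SOURCE A (Python) =====
-- def version_1(g, n=100):
--     sieve = [i for i in range(n)]
--     sieve[1] = 0
--     lst = []
--     for i in range(2, n):
--         if sieve[i] != 0:
--             j = i + i
--             while j < n:
--                 sieve[j] = 0
--                 j += i
--     for c in sieve:
--         if sieve[c] != 0:
--             lst.append([c])
--     return lst[g]
-- ===== SOURCE B (Python) =====
-- def version_1(g, n=100):
--     primes = []
--     for p in range(2, n):
--         d = 2
--         is_p = True
--         while d * d <= p:
--             if p % d == 0: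
--                 is_p = False
--                 break
--             d += 1
--         if is_p:
--             primes.append([p])
--     return primes[g]
-- ===== Notes on version B (the rewrite author's own statement) =====
-- stated objective: alternative
-- what changed: Replaces the sieve of Eratosthenes over a mutable array (plus a value-indexed second pass) with direct trial division: each candidate p in range(2,n) is tested by dividing by d while d*d <= p, and the g-th surviving singleton is returned.
import Mathlib
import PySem

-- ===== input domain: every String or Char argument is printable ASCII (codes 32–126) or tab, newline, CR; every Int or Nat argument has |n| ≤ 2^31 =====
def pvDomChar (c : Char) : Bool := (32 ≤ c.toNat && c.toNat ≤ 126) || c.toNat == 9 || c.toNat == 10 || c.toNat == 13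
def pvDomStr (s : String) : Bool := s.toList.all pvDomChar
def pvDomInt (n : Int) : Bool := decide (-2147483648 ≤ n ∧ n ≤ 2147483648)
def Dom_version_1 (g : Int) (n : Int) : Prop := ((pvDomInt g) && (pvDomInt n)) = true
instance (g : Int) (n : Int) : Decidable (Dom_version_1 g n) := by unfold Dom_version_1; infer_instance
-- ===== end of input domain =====

-- B replaces A's sieve-of-Eratosthenes + value-indexed scan with per-candidate trial division (alternative algorithm, similar cost).

-- ===== PORT A =====
-- Python lists are mutable arrays, so the sieve is an Array Int (every index written/read below is
-- provably nonnegative and in range on admitted inputs, so Nat indexing matches Python's).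
-- inner 'while j < n: sieve[j] = 0; j += i' (the '0 < i' conjunct only makes the recursion total; every call has i ≥ 2)
def sieveInner (n i : Int) (sieve : Array Int) (j : Int) : Array Int :=
  if h : 0 < i ∧ j < n then
    sieveInner n i (sieve.setIfInBounds j.toNat 0) (j + i)
  else sieve
termination_by (n - j).toNat
decreasing_by omega

-- sieve = [i for i in range(n)]; sieve[1] = 0 (index 1 is in range under Pre_: 2 ≤ n);
-- then for i in range(2, n): if sieve[i] != 0: j = i + i; while j < n: ...   (index i ∈ [2,n) is always in range)
def sieveA (n : Int) : Array Int :=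
  (PySem.List.pyRange 2 n 1).foldl
    (fun s i => if s.getD i.toNat 0 ≠ 0 then sieveInner n i s (i + i) else s)
    (((Array.range n.toNat).map (fun k => Int.ofNat k)).setIfInBounds 1 0)

-- for c in sieve: if sieve[c] != 0: lst.append([c])   (every value c of sieve lies in [0,n), so in range)
def lstA (sieve : Array Int) : Array (List Int) :=
  sieve.foldl
    (fun acc c => if sieve.getD c.toNat 0 ≠ 0 then acc.push [c] else acc) (#[] : Array (List Int))

def version_1 (g : Int) (n : Int) : List Int :=
  PySem.List.pyGetD (lstA (sieveA n)).toList g []   -- return lst[g]   (index g in range under Pre_)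

-- ===== PORT B =====
-- 'd = 2; while d*d <= p: if p % d == 0: is_p = False; break; d += 1' as a Bool-returning loop
-- (the '2 ≤ d' conjunct only makes the recursion total; calls start at d = 2 and increment)
def trialLoop (p : Int) (d : Int) : Bool :=
  if hg : 2 ≤ d ∧ d * d ≤ p then
    (if PySem.Int.mod p d = 0 then false else trialLoop p (d + 1))
  else true
termination_by (p - d).toNat
decreasing_by
  have h2 : d * 2 ≤ d * d := by nlinarith [hg.1]
  omega

-- for p in range(2, n): ... if is_p: primes.append([p])   (append = Array.push, as in Python)
def primesB (n : Int) : Array (List Int) :=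
  (PySem.List.pyRange 2 n 1).foldl
    (fun acc p => if trialLoop p 2 then acc.push [p] else acc) (#[] : Array (List Int))

def version_1_alt (g : Int) (n : Int) : List Int :=
  PySem.List.pyGetD (primesB n).toList g []   -- return primes[g]   (index g in range under Pre_)

-- ===== PRECONDITION & SPEC =====
-- helpers for Pre_ only: 'there are at least t primes below n', decided by trial division with an
-- early exit once t primes are found, plus two Chebyshev-type shortcuts so the decision is cheap:
-- n/(2*(log2 n + 1)) ≤ π(n) ≤ n/3 + 3 (small t is accepted, huge t refused, at once).
def pvTrialDiv (k : Nat) (d : Nat) : Bool :=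
  if h : 2 ≤ d ∧ d * d ≤ k then
    (if k % d = 0 then false else pvTrialDiv k (d + 1))
  else true
termination_by k - d
decreasing_by
  have h2 : 2 * d ≤ d * d := Nat.mul_le_mul_right d h.1
  omega

def pvIsPrimeB (k : Nat) : Bool := 2 ≤ k && pvTrialDiv k 2

def pvCountCapped (n k : Int) (cap acc : Nat) : Nat :=
  if h : k < n ∧ acc < cap then
    pvCountCapped n (k + 1) cap (acc + if pvIsPrimeB k.toNat then 1 else 0)
  else acc
termination_by (n - k).toNat
decreasing_by omega

def pvAtLeastPrimes (n : Int) (t : Nat) : Bool :=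
  t ≤ n.toNat / (2 * (Nat.log2 n.toNat + 1)) ||
    (t ≤ n.toNat / 3 + 3 && pvCountCapped n 2 t 0 = t)

-- Pre_ excludes exactly the inputs where Python A raises IndexError: n ≤ 1 ('sieve[1] = 0' fails)
-- and g outside Python index range of the list of primes below n ('lst[g]' fails), i.e. the number
-- of primes below n must be at least g+1 (g ≥ 0) resp. at least |g| (g < 0).
def Pre_version_1 (g : Int) (n : Int) : Prop :=
  2 ≤ n ∧ (if 0 ≤ g then pvAtLeastPrimes n (g.toNat + 1) = true
           else pvAtLeastPrimes n g.natAbs = true)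
instance (g : Int) (n : Int) : Decidable (Pre_version_1 g n) := by unfold Pre_version_1; infer_instance
def pvWitness_version_1 : Int × Int := (0, 10)
def Spec_version_1 (g : Int) (n : Int) (out : List Int) : Prop := out = version_1_alt g n
instance (g : Int) (n : Int) (out : List Int) : Decidable (Spec_version_1 g n out) := by unfold Spec_version_1; infer_instance

-- ===== CLAIM (what is proved, stated in full; the proofs are below) =====
def Claim_equal_version_1 : Prop := ∀ (g : Int) (n : Int), Dom_version_1 g n → Pre_version_1 g n → Spec_version_1 g n (version_1 g n)

-- ===== LEMMAS AND PROOFS =====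

-- List models of the two ports (proof-only; the ports themselves run on arrays)
def sieveInnerL (n i : Int) (sieve : List Int) (j : Int) : List Int :=
  if h : 0 < i ∧ j < n then
    sieveInnerL n i (PySem.List.pySetD sieve j 0) (j + i)
  else sieve
termination_by (n - j).toNat
decreasing_by omega

def sieveAL (n : Int) : List Int :=
  (PySem.List.pyRange 2 n 1).foldl
    (fun s i => if PySem.List.pyGetD s i 0 ≠ 0 then sieveInnerL n i s (i + i) else s)
    (PySem.List.pySetD (PySem.List.pyRange 0 n 1) 1 0)

def lstAL (sieve : List Int) : List (List Int) :=
  sieve.foldl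
    (fun acc c => if PySem.List.pyGetD sieve c 0 ≠ 0 then acc ++ [[c]] else acc)
    ([] : List (List Int))

def primesBL (n : Int) : List (List Int) :=
  (PySem.List.pyRange 2 n 1).foldl
    (fun acc p => if trialLoop p 2 then acc ++ [[p]] else acc) ([] : List (List Int))

theorem sieveInnerL_get (n i : Int) (j : Int) (s : List Int) (hi : 0 < i) (hj : 0 ≤ j)
    (hlen : (s.length : Int) = n) (t : Nat) :
    (sieveInnerL n i s j)[t]? =
      if j ≤ (t : Int) ∧ (t : Int) < n ∧ i ∣ ((t : Int) - j) then some 0 else s[t]? := by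
  fun_induction sieveInnerL n i s j with
  | case1 s' j' h ih =>
    rw [ih (by omega) (by simp [PySem.List.length_pySetD]; omega),
        PySem.List.pySetD_of_nonneg s' 0 hj]
    have hshift : (i ∣ (t : Int) - (j' + i)) ↔ (i ∣ (t : Int) - j') := by
      rw [show (t : Int) - (j' + i) = ((t : Int) - j') - i by ring]
      exact ⟨fun hd => by simpa using dvd_add hd (dvd_refl i),
             fun hd => dvd_sub hd (dvd_refl i)⟩
    by_cases ht : (t : Int) = j'
    · have h2 : t = j'.toNat := by omega
      rw [if_neg (by omega), if_pos ⟨by omega, by omega, by rw [ht]; simp⟩, h2,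
          List.getElem?_set_self (by omega)]
    · rw [List.getElem?_set_ne (by omega)]
      by_cases hc : (t : Int) < n ∧ i ∣ ((t : Int) - j')
      · have hlt : j' < (t : Int) ∨ (t : Int) < j' := by omega
        rcases hlt with hlt | hlt
        · have := Int.le_of_dvd (by omega) hc.2
          rw [if_pos ⟨by omega, hc.1, hshift.mpr hc.2⟩, if_pos ⟨by omega, hc⟩]
        · have h4 : ¬ (j' ≤ (t : Int)) := by omega
          rw [if_neg (by omega), if_neg (by tauto)]
      · rw [if_neg (by rw [hshift]; tauto), if_neg (by tauto)]
  | case2 s' j' h =>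
    rw [if_neg (by rintro ⟨h1, h2, -⟩; exact h ⟨hi, by omega⟩)]

theorem trialLoop_inv (p : Int) (d : Int) (hd : 2 ≤ d) :
    trialLoop p d = true ↔ ∀ e : Int, d ≤ e → e * e ≤ p → ¬ e ∣ p := by
  fun_induction trialLoop p d with
  | case1 d' hg hm =>
    simp only [Bool.false_eq_true, false_iff]
    rw [PySem.Int.mod_eq_zero_iff_dvd] at hm
    push Not
    exact ⟨d', le_refl _, hg.2, hm⟩
  | case2 d' hg hm ih =>
    rw [ih (by omega)]
    rw [PySem.Int.mod_eq_zero_iff_dvd] at hm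
    constructor
    · intro H e he1 he2
      rcases eq_or_lt_of_le he1 with rfl | hlt
      · exact hm
      · exact H e (by omega) he2
    · intro H e he1 he2
      exact H e (by omega) he2
  | case3 d' hg =>
    simp only [true_iff]
    intro e he1 he2 hdvd
    have : d' * d' ≤ e * e := by nlinarith
    exact hg ⟨hd, by omega⟩

def isPr (k : Int) : Prop := 2 ≤ k ∧ ∀ d : Int, 2 ≤ d → d < k → ¬ d ∣ k

theorem trialLoop_spec (p : Int) (hp : 2 ≤ p) : trialLoop p 2 = true ↔ isPr p := by
  rw [trialLoop_inv p 2 (le_refl _)]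
  constructor
  · intro H
    refine ⟨hp, fun d hd1 hd2 hdvd => ?_⟩
    obtain ⟨e, he⟩ := hdvd
    have he2 : 2 ≤ e := by nlinarith
    by_cases hc : d * d ≤ p
    · exact H d hd1 hc ⟨e, he⟩
    · have hed : e < d := by nlinarith
      have : e * e ≤ p := by nlinarith
      exact H e he2 this ⟨d, by rw [he]; ring⟩
  · rintro ⟨-, H⟩ e he1 he2 hdvd
    have : e < p := by nlinarith
    exact H e he1 this hdvd

def zb (m k : Int) : Bool :=
  (k == 1) || ((PySem.List.pyRange 2 m 1).any (fun i => decide (i ∣ k) && decide (2 * i ≤ k)))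

theorem zb_iff (m k : Int) :
    zb m k = true ↔ k = 1 ∨ ∃ i, 2 ≤ i ∧ i < m ∧ i ∣ k ∧ 2 * i ≤ k := by
  simp [zb, PySem.List.mem_pyRange_one]
  constructor
  · rintro (h | ⟨i, ⟨h1, h2⟩, h3, h4⟩)
    · exact Or.inl h
    · exact Or.inr ⟨i, h1, h2, h3, h4⟩
  · rintro (h | ⟨i, h1, h2, h3, h4⟩)
    · exact Or.inl h
    · exact Or.inr ⟨i, ⟨h1, h2⟩, h3, h4⟩

theorem zb_not_iff_isPr (n k : Int) (h2 : 2 ≤ k) (hkn : k < n) :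
    zb n k = false ↔ isPr k := by
  rw [← Bool.not_eq_true, zb_iff]
  constructor
  · intro H
    refine ⟨h2, fun d hd1 hd2 hdvd => ?_⟩
    apply H
    obtain ⟨e, he⟩ := hdvd
    have he2 : 2 ≤ e := by nlinarith
    exact Or.inr ⟨d, hd1, by omega, ⟨e, he⟩, by nlinarith⟩
  · rintro ⟨-, H⟩ (h1 | ⟨i, hi1, hi2, hi3, hi4⟩)
    · omega
    · exact H i hi1 (by omega) hi3

theorem zb_succ (m k : Int) (hm : 2 ≤ m) :
    zb (m + 1) k = (zb m k || (decide (m ∣ k) && decide (2 * m ≤ k))) := by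
  unfold zb
  rw [PySem.List.pyRange_one_succ_right hm, List.any_append]
  simp [Bool.or_assoc]

theorem zb_succ_of_zb_self (m k : Int) (hm : 2 ≤ m) (hz : zb m m = true) :
    zb (m + 1) k = zb m k := by
  rw [zb_succ m k hm]
  by_cases h : m ∣ k ∧ 2 * m ≤ k
  · rcases (zb_iff m m).mp hz with h1 | ⟨d, hd1, hd2, hd3, hd4⟩
    · omega
    · have : zb m k = true := by
        rw [zb_iff]
        exact Or.inr ⟨d, hd1, hd2, hd3.trans h.1, by omega⟩
      simp [this]
  · have : ¬ (decide (m ∣ k) && decide (2 * m ≤ k)) = true := by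
      simp only [Bool.and_eq_true, decide_eq_true_eq]; tauto
    simp only [Bool.not_eq_true] at this
    simp [this]

def modelS (n m : Int) : List Int :=
  (PySem.List.pyRange 0 n 1).map (fun k => if zb m k = true then 0 else k)

theorem range0_get (n : Int) (t : Nat) :
    (PySem.List.pyRange 0 n 1)[t]? = if (t : Int) < n then some (t : Int) else none := by
  rw [PySem.List.pyRange_one]
  simp only [List.getElem?_map]
  by_cases h : (t : Int) < n
  · rw [List.getElem?_eq_getElem (l := List.range (n - 0).toNat) (by simp; omega)]
    simp [List.getElem_range, if_pos h]
  · rw [List.getElem?_eq_none (by simp; omega), if_neg h]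
    rfl

theorem model_get (n m : Int) (t : Nat) :
    (modelS n m)[t]? = if (t : Int) < n then some (if zb m t = true then 0 else (t : Int)) else none := by
  unfold modelS
  rw [List.getElem?_map, range0_get]
  by_cases h : (t : Int) < n <;> simp [h]

theorem model_length (n m : Int) : (modelS n m).length = (n - 0).toNat := by
  unfold modelS
  rw [List.length_map, PySem.List.length_pyRange_one]

theorem model_getD (n m k : Int) (h0 : 0 ≤ k) (h1 : k < n) :
    PySem.List.pyGetD (modelS n m) k 0 = if zb m k = true then 0 else k := by
  rw [PySem.List.pyGetD_eq_getElem _ 0 h0 (by rw [model_length]; omega)]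
  have h2 := model_get n m k.toNat
  rw [if_pos (by omega : ((k.toNat : Nat) : Int) < n)] at h2
  rw [List.getElem?_eq_getElem (by rw [model_length]; omega)] at h2
  have h3 : ((k.toNat : Nat) : Int) = k := by omega
  rw [h3] at h2
  exact Option.some.inj h2

theorem zb_two (k : Int) : zb 2 k = (k == 1) := by
  unfold zb
  rw [PySem.List.pyRange_one_eq_nil (le_refl 2)]
  simp

theorem base_model (n : Int) (hn : 2 ≤ n) :
    PySem.List.pySetD (PySem.List.pyRange 0 n 1) 1 0 = modelS n 2 := by
  rw [PySem.List.pySetD_of_nonneg _ 0 (by omega : (0:Int) ≤ 1)]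
  apply List.ext_getElem?
  intro t
  rw [List.getElem?_set, model_get, range0_get]
  simp only [Int.toNat_one]
  by_cases h : (t : Int) < n
  · rw [if_pos h, if_pos h, zb_two]
    by_cases ht : (1 : Nat) = t
    · rw [if_pos ht, if_pos (by rw [PySem.List.length_pyRange_one]; omega)]
      have : ((t:Int) == 1) = true := by simp [← ht]
      rw [this]
      simp
    · rw [if_neg ht]
      have : ((t:Int) == 1) = false := by simp; omega
      rw [this]
      simp
  · rw [if_neg h, if_neg h]
    split
    · rw [if_neg (by rw [PySem.List.length_pyRange_one]; omega)]
    · rfl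

theorem sieveAL_model (n : Int) (hn : 2 ≤ n) (m : Int) (hm : 2 ≤ m) (hmn : m ≤ n) :
    (PySem.List.pyRange 2 m 1).foldl
      (fun s i => if PySem.List.pyGetD s i 0 ≠ 0 then sieveInnerL n i s (i + i) else s)
      (PySem.List.pySetD (PySem.List.pyRange 0 n 1) 1 0)
    = modelS n m := by
  induction m, hm using Int.le_induction with
  | base =>
    rw [PySem.List.pyRange_one_eq_nil (le_refl 2), List.foldl_nil, base_model n hn]
  | succ m hm2 ih =>
    rw [PySem.List.pyRange_one_succ_right hm2, List.foldl_append, ih (by omega), List.foldl_cons,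
        List.foldl_nil]
    rw [model_getD n m m (by omega) (by omega)]
    by_cases hz : zb m m = true
    · rw [if_pos hz, if_neg (by simp)]
      unfold modelS
      apply List.map_congr_left
      intro k _
      rw [zb_succ_of_zb_self m k hm2 hz]
    · rw [if_neg hz, if_pos (by omega : (m:Int) ≠ 0)]
      apply List.ext_getElem?
      intro t
      rw [sieveInnerL_get n m (m + m) (modelS n m) (by omega) (by omega)
            (by rw [model_length]; omega) t]
      rw [model_get, model_get]
      have hdvd : (m ∣ (t : Int) - (m + m)) ↔ (m ∣ (t : Int)) := by
        constructor
        · intro hd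
          have := dvd_add hd (Dvd.dvd.add (dvd_refl m) (dvd_refl m))
          simpa using this
        · intro hd
          exact dvd_sub hd (Dvd.dvd.add (dvd_refl m) (dvd_refl m))
      by_cases h : (t : Int) < n
      · rw [if_pos h, if_pos h]
        by_cases hc : m + m ≤ (t : Int) ∧ m ∣ ((t : Int) - (m + m))
        · rw [if_pos ⟨hc.1, h, hc.2⟩]
          have : zb (m + 1) t = true := by
            rw [zb_succ m t hm2]
            simp only [Bool.or_eq_true, Bool.and_eq_true, decide_eq_true_eq]
            exact Or.inr ⟨hdvd.mp hc.2, by omega⟩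
          rw [if_pos this]
        · rw [if_neg (by tauto)]
          have : zb (m + 1) (t : Int) = zb m (t : Int) := by
            rw [zb_succ m t hm2]
            have : (decide (m ∣ (t:Int)) && decide (2 * m ≤ (t:Int))) = false := by
              simp only [Bool.and_eq_false_iff, decide_eq_false_iff_not]
              by_cases h1 : m ∣ (t : Int)
              · refine Or.inr ?_
                have h2 : ¬ (m + m ≤ (t : Int)) := fun hle => hc ⟨hle, hdvd.mpr h1⟩
                omega
              · exact Or.inl h1
            rw [this, Bool.or_false]
          rw [this]
      · rw [if_neg h, if_neg h, if_neg (by tauto)]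

theorem foldl_append_ite {α β : Type} (P : α → Prop) [DecidablePred P] (f : α → β)
    (l : List α) (acc : List β) :
    l.foldl (fun acc x => if P x then acc ++ [f x] else acc) acc
      = acc ++ (l.filter (fun x => decide (P x))).map f := by
  induction l generalizing acc with
  | nil => simp
  | cons a l ih =>
    simp only [List.foldl_cons, List.filter_cons]
    by_cases h : P a
    · rw [if_pos h, ih]; simp [h]
    · rw [if_neg h, ih]; simp [h]

theorem zb_zero (n : Int) : zb n 0 = false := by
  simp only [zb, Bool.or_eq_false_iff]
  refine ⟨by simp, ?_⟩
  rw [List.any_eq_false]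
  intro i hi
  rw [PySem.List.mem_pyRange_one] at hi
  simp only [Bool.and_eq_true, decide_eq_true_eq, not_and]
  intro _
  omega

theorem zb_one (n : Int) : zb n 1 = true := by simp [zb]

theorem lstAL_eq (n : Int) (hn : 2 ≤ n) :
    lstAL (sieveAL n) = ((PySem.List.pyRange 2 n 1).filter
        (fun k => decide (zb n k = false))).map (fun k => [k]) := by
  unfold lstAL
  rw [foldl_append_ite (fun c => PySem.List.pyGetD (sieveAL n) c 0 ≠ 0) (fun c => [c])]
  rw [List.nil_append]
  have hs : sieveAL n = modelS n n := sieveAL_model n hn n hn (le_refl n)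
  rw [hs]
  have hp : ∀ c ∈ modelS n n,
      decide (PySem.List.pyGetD (modelS n n) c 0 ≠ 0) = decide (c ≠ 0) := by
    intro c hc
    unfold modelS at hc
    rw [List.mem_map] at hc
    obtain ⟨k, hk, rfl⟩ := hc
    rw [PySem.List.mem_pyRange_one] at hk
    by_cases hz : zb n k = true
    · rw [if_pos hz, model_getD n n 0 (le_refl 0) (by omega)]
      simp [zb_zero]
    · rw [if_neg hz, model_getD n n k hk.1 hk.2, if_neg hz]
  rw [List.filter_congr hp]
  unfold modelS
  rw [List.filter_map]
  have hq : ∀ k ∈ PySem.List.pyRange 0 n 1,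
      ((fun c => decide (c ≠ 0)) ∘ (fun k => if zb n k = true then 0 else k)) k
        = decide (zb n k = false ∧ 2 ≤ k) := by
    intro k hk
    rw [PySem.List.mem_pyRange_one] at hk
    simp only [Function.comp_apply]
    by_cases hz : zb n k = true
    · rw [if_pos hz]
      simp [hz]
    · rw [if_neg hz]
      simp only [Bool.not_eq_true] at hz
      by_cases h2 : 2 ≤ k
      · simp [hz, h2]
        omega
      · have hk01 : k = 0 ∨ k = 1 := by omega
        rcases hk01 with rfl | rfl
        · simp
        · exact absurd (zb_one n) (by simp [hz])
  rw [List.filter_congr hq]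
  have hsplit : PySem.List.pyRange 0 n 1 = PySem.List.pyRange 0 2 1 ++ PySem.List.pyRange 2 n 1 :=
    PySem.List.pyRange_one_append 0 2 n (by omega) hn
  rw [hsplit, List.filter_append]
  have h02 : PySem.List.pyRange 0 2 1 = [0, 1] := by decide
  have hfilter02 : (PySem.List.pyRange 0 2 1).filter
      (fun k => decide (zb n k = false ∧ 2 ≤ k)) = [] := by
    rw [h02]
    simp [List.filter]
  rw [hfilter02, List.nil_append]
  have hq2 : ∀ k ∈ PySem.List.pyRange 2 n 1,
      decide (zb n k = false ∧ 2 ≤ k) = decide (zb n k = false) := by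
    intro k hk
    rw [PySem.List.mem_pyRange_one] at hk
    simp [hk.1]
  rw [List.filter_congr hq2, List.map_map]
  apply List.map_congr_left
  intro k hk
  rw [List.mem_filter] at hk
  have hzf : zb n k = false := by simpa using hk.2
  simp only [Function.comp_apply]
  rw [if_neg (by simp [hzf])]

theorem lists_eq (n : Int) (hn : 2 ≤ n) : lstAL (sieveAL n) = primesBL n := by
  rw [lstAL_eq n hn]
  unfold primesBL
  rw [foldl_append_ite (fun p => trialLoop p 2 = true) (fun p => [p]), List.nil_append]
  congr 1
  apply List.filter_congr
  intro p hp
  rw [PySem.List.mem_pyRange_one] at hp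
  have h1 := zb_not_iff_isPr n p hp.1 hp.2
  have h2 := trialLoop_spec p hp.1
  by_cases ht : trialLoop p 2 = true
  · simp [ht, h1.mpr (h2.mp ht)]
  · have hz : zb n p = true := by
      cases hzb : zb n p
      · exact absurd (h2.mpr (h1.mp hzb)) ht
      · rfl
    simp [ht, hz]


-- ===== bridges: array ports = list models =====
theorem arr_getD (a : Array Int) (k : Nat) (d : Int) : a.getD k d = a.toList.getD k d := by
  simp [Array.getD, List.getD]
  split
  · next h => rw [Array.getElem?_eq_getElem h]; rfl
  · next h => rw [Array.getElem?_eq_none (by omega)]; rfl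

theorem sieveInner_toList (n i j : Int) (a : Array Int) (hj : 0 ≤ j) :
    (sieveInner n i a j).toList = sieveInnerL n i a.toList j := by
  fun_induction sieveInner n i a j with
  | case1 a' j' h ih =>
    conv_rhs => rw [sieveInnerL.eq_def]
    rw [dif_pos h, ih (by omega), Array.toList_setIfInBounds,
        PySem.List.pySetD_of_nonneg _ 0 hj]
  | case2 a' j' h =>
    conv_rhs => rw [sieveInnerL.eq_def]
    rw [dif_neg h]

theorem sieveA_foldl_bridge (n : Int) (L : List Int) (hL : ∀ x ∈ L, 0 ≤ x) (a : Array Int) :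
    (L.foldl (fun s i => if s.getD i.toNat 0 ≠ 0 then sieveInner n i s (i + i) else s) a).toList
      = L.foldl (fun s i => if PySem.List.pyGetD s i 0 ≠ 0 then sieveInnerL n i s (i + i) else s)
          a.toList := by
  induction L generalizing a with
  | nil => rfl
  | cons i L ih =>
    simp only [List.foldl_cons]
    have hi : 0 ≤ i := hL i (by simp)
    have hget : a.getD i.toNat 0 = PySem.List.pyGetD a.toList i 0 := by
      rw [arr_getD, ← PySem.List.pyGetD_natCast, (by omega : ((i.toNat : Nat) : Int) = i)]
    have harg : (if a.getD i.toNat 0 ≠ 0 then sieveInner n i a (i + i) else a).toList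
        = (if PySem.List.pyGetD a.toList i 0 ≠ 0 then sieveInnerL n i a.toList (i + i)
           else a.toList) := by
      rw [hget]
      split_ifs with hc
      · exact sieveInner_toList n i (i + i) a (by omega)
      · rfl
    rw [ih (fun x hx => hL x (by simp [hx])), harg]

theorem sieveA_toList (n : Int) : (sieveA n).toList = sieveAL n := by
  unfold sieveA sieveAL
  rw [sieveA_foldl_bridge n _ (fun x hx => by
        rw [PySem.List.mem_pyRange_one] at hx; omega)]
  congr 1
  rw [Array.toList_setIfInBounds, Array.toList_map, Array.toList_range,
      PySem.List.pySetD_of_nonneg _ 0 (by omega : (0:Int) ≤ 1)]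
  congr 1
  rw [PySem.List.pyRange_one]
  simp

theorem foldl_push_ite {α β : Type} (P : α → Prop) [DecidablePred P] (f : α → β)
    (l : List α) (arr : Array β) :
    (l.foldl (fun a x => if P x then a.push (f x) else a) arr).toList
      = arr.toList ++ (l.filter (fun x => decide (P x))).map f := by
  induction l generalizing arr with
  | nil => simp
  | cons a l ih =>
    simp only [List.foldl_cons, List.filter_cons]
    by_cases h : P a
    · rw [if_pos h, ih]; simp [h]
    · rw [if_neg h, ih]; simp [h]

theorem modelS_mem_nonneg (n m c : Int) (hc : c ∈ modelS n m) : 0 ≤ c := by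
  unfold modelS at hc
  rw [List.mem_map] at hc
  obtain ⟨k, hk, rfl⟩ := hc
  rw [PySem.List.mem_pyRange_one] at hk
  split
  · omega
  · omega

theorem lstA_toList (n : Int) (hn : 2 ≤ n) : (lstA (sieveA n)).toList = lstAL (sieveAL n) := by
  unfold lstA lstAL
  rw [← Array.foldl_toList, sieveA_toList]
  have hmod : sieveAL n = modelS n n := sieveAL_model n hn n hn (le_refl n)
  have hnn : ∀ c ∈ sieveAL n, 0 ≤ c := by
    intro c hc
    rw [hmod] at hc
    exact modelS_mem_nonneg n n c hc
  have hcongr : ∀ (acc : Array (List Int)) (c : Int), c ∈ sieveAL n →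
      (if (sieveA n).getD c.toNat 0 ≠ 0 then acc.push [c] else acc)
        = (if PySem.List.pyGetD (sieveAL n) c 0 ≠ 0 then acc.push [c] else acc) := by
    intro acc c hc
    have hget : (sieveA n).getD c.toNat 0 = PySem.List.pyGetD (sieveAL n) c 0 := by
      rw [arr_getD, sieveA_toList, ← PySem.List.pyGetD_natCast,
          (by have := hnn c hc; omega : ((c.toNat : Nat) : Int) = c)]
    rw [hget]
  rw [PySem.List.foldl_congr_mem (sieveAL n) _ _ (#[] : Array (List Int)) hcongr]
  rw [foldl_push_ite (fun c => PySem.List.pyGetD (sieveAL n) c 0 ≠ 0) (fun c => [c]),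
      foldl_append_ite (fun c => PySem.List.pyGetD (sieveAL n) c 0 ≠ 0) (fun c => [c])]

theorem primesB_toList (n : Int) : (primesB n).toList = primesBL n := by
  unfold primesB primesBL
  rw [foldl_push_ite (fun p => trialLoop p 2 = true) (fun p => [p]),
      foldl_append_ite (fun p => trialLoop p 2 = true) (fun p => [p])]

-- ===== VERDICT (by name: the statement is the Claim_ definition above) =====
theorem version_1_spec : Claim_equal_version_1 := by
  intro g n _ hpre
  unfold Spec_version_1 version_1 version_1_alt
  rw [lstA_toList n hpre.1, lists_eq n hpre.1, primesB_toList]
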